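-- pv_equiv track=rewrite | github.com/alpharol/algorithm_python3 | leetcode/0401-0500/0443.压缩字符串.py | compress
-- ===== SOURCE A (Python) =====
-- def compress(chars: list) -> int:
--     count = 1
--     for i in range(len(chars)-1,-1,-1):
--         if i > 0 and chars[i] == chars[i-1]:
--             count = count + 1
--         else:
--             end = i + count
--             if count == 1:
--                 chars[i:end] = [chars[i]]
--             else:
--                 chars[i:end] = [chars[i]] + list(str(count))
--                 count = 1
--     return chars
-- ===== SOURCE B (Python) =====
-- def compress(chars: list) -> int:
--     # single forward two-pointer pass over maximal runs, building the
--     # compressed list once instead of A's backward slice-assignment rewrites.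
--     out = []
--     n = len(chars)
--     i = 0
--     while i < n:
--         j = i + 1
--         while j < n and chars[j] == chars[i]:
--             j += 1
--         out.append(chars[i])
--         if j - i > 1:
--             out.extend(str(j - i))
--         i = j
--     chars[:] = out
--     return chars
-- ===== Notes on version B (the rewrite author's own statement) =====
-- stated objective: alternative
-- what changed: Replaces A's backward loop that rewrites the list in place via slice-assignment at the start of every run with a single forward two-pointer pass over maximal runs that builds the compressed list once.
import Mathlib
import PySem

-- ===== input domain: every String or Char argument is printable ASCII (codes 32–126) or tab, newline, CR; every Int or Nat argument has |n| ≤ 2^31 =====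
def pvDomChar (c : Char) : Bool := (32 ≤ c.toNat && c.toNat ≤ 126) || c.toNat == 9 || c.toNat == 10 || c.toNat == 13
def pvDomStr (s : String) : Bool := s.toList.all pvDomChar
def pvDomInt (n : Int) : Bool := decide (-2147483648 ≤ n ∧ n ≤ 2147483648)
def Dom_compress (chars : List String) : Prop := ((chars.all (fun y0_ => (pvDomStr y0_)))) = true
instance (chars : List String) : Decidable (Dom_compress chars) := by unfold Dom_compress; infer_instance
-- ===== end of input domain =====

-- B replaces A's backward loop of in-place slice-assignment rewrites by a single forward
-- two-pointer pass over maximal runs that builds the compressed list once. Both Pythons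
-- mutate `chars` in place to the same final list; the equivalence proved here is about the
-- RETURN value.

-- ===== PORT A =====
-- loop body of A, verbatim: state = (chars, count).  chars[i] / chars[i-1] are always
-- in range when read (indices lie in the untouched prefix), so pyGetD is exact here;
-- slice assignment chars[i:end] = X  is  take i ++ X ++ drop end  (i, end ≥ 0; clamped like Python).
def stepA (st : List String × Int) (i : Int) : List String × Int :=
  let cs := st.1
  let count := st.2
  if 0 < i ∧ PySem.List.pyGetD cs i "" = PySem.List.pyGetD cs (i - 1) "" then
    (cs, count + 1)
  else
    if count = 1 then
      (cs.take i.toNat ++ [PySem.List.pyGetD cs i ""] ++ cs.drop (i + count).toNat, count)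
    else
      (cs.take i.toNat ++ ([PySem.List.pyGetD cs i ""] ++ (PySem.Int.toStr count).toList.map (fun c => String.ofList [c])) ++ cs.drop (i + count).toNat, 1)

def compress (chars : List String) : List String :=
  ((PySem.List.pyRange ((chars.length : Int) - 1) (-1) (-1)).foldl stepA (chars, 1)).1

-- ===== PORT B =====
-- inner while loop of Source B: advance j while chars[j] == chars[i] (c = chars[i])
def runEnd (chars : List String) (c : String) (j : Nat) : Nat :=
  if h : j < chars.length then
    if chars[j] = c then runEnd chars c (j + 1) else j
  else j
termination_by chars.length - j

theorem le_runEnd (chars : List String) (c : String) (j : Nat) : j ≤ runEnd chars c j := by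
  rw [runEnd]
  split
  · split
    · have := le_runEnd chars c (j + 1); omega
    · exact le_refl j
  · exact le_refl j
termination_by chars.length - j

-- outer while loop of Source B, accumulating `out`
def altGo (chars : List String) (i : Nat) (out : List String) : List String :=
  if h : i < chars.length then
    let c := chars[i]
    let j := runEnd chars c (i + 1)
    altGo chars j
      (out ++ [c] ++ (if 1 < j - i then (PySem.Int.toStr ((j : Int) - (i : Int))).toList.map (fun ch => String.ofList [ch]) else []))
  else out
termination_by chars.length - i
decreasing_by
  have h1 := le_runEnd chars chars[i] (i + 1)
  omega

def compress_alt (chars : List String) : List String := altGo chars 0 []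

-- ===== PRECONDITION & SPEC =====
def Spec_compress (chars : List String) (out : List String) : Prop := out = compress_alt chars
instance (chars : List String) (out : List String) : Decidable (Spec_compress chars out) := by unfold Spec_compress; infer_instance

-- ===== CLAIM (what is proved, stated in full; the proofs are below) =====
def Claim_equal_compress : Prop := ∀ (chars : List String), Dom_compress chars → Spec_compress chars (compress chars)


-- ===== LEMMAS AND PROOFS =====

-- range(n-1,-1,-1) unrolled one step
theorem pyRange_down_succ (i : Nat) :
    PySem.List.pyRange ((i+1 : Nat) : Int) (-1) (-1) = ((i+1 : Nat) : Int) :: PySem.List.pyRange ((i : Nat) : Int) (-1) (-1) := by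
  simp only [PySem.List.pyRange]
  norm_num
  have h1 : (-1:Int) < (i:Int) := by omega
  rw [if_pos h1]
  have h2 : ((i:Int) + 1 + 1).toNat = i + 2 := by omega
  rw [h2, List.range_succ_eq_map, List.map_cons, List.map_map]
  norm_num

theorem pyRange_down_zero : PySem.List.pyRange (0:Int) (-1) (-1) = [0] := by decide
theorem pyRange_down_nil : PySem.List.pyRange (-1:Int) (-1) (-1) = [] := by decide

-- runEnd finds exactly the end of the maximal run
theorem runEnd_eq (chars : List String) (c : String) (j m : Nat) (hjm : j ≤ m) (hm : m ≤ chars.length)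
    (hall : ∀ p, j ≤ p → p < m → chars.getD p "" = c)
    (hend : m = chars.length ∨ chars.getD m "" ≠ c) :
    runEnd chars c j = m := by
  rw [runEnd]
  split
  · rename_i h
    by_cases hjm' : j = m
    · subst hjm'
      have : chars.getD j "" = chars[j] := List.getD_eq_getElem _ _ h
      rcases hend with he | he
      · omega
      · rw [if_neg (by rw [← this]; exact fun hc => he hc)]
    · have hj : j < m := lt_of_le_of_ne hjm hjm'
      have hc : chars[j] = c := by
        have := hall j le_rfl hj
        rwa [List.getD_eq_getElem _ _ h] at this
      rw [if_pos hc]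
      exact runEnd_eq chars c (j+1) m (by omega) hm (fun p hp1 hp2 => hall p (by omega) hp2) hend
  · omega
termination_by m - j

theorem altGo_out (chars : List String) : ∀ (i : Nat) (out : List String),
    altGo chars i out = out ++ altGo chars i [] := by
  intro i
  induction hn : chars.length - i using Nat.strong_induction_on generalizing i with
  | _ n ih =>
    intro out
    rw [altGo, altGo]
    split
    · rename_i h
      have h1 := le_runEnd chars chars[i] (i + 1)
      have key : ∀ o, altGo chars (runEnd chars chars[i] (i+1)) o = o ++ altGo chars (runEnd chars chars[i] (i+1)) [] :=
        fun o => ih (chars.length - runEnd chars chars[i] (i+1)) (by omega) _ rfl o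
      conv_lhs => rw [key]
      conv_rhs => rw [key]
      simp
    · simp



-- reading an index that lies inside the untouched prefix
theorem getD_prefix (chars rest : List String) (p m : Nat) (hm : m < p) (hp : p ≤ chars.length) :
    (List.take p chars ++ rest).getD m "" = chars.getD m "" := by
  rw [List.getD_append _ _ _ m (by simp [List.length_take]; omega)]
  simp only [List.getD_eq_getElem?_getD, List.getElem?_take, if_pos hm]

-- flushing one maximal run = one step of altGo
theorem altGo_run (chars : List String) (i cnt : Nat) (h1 : 1 ≤ cnt) (h2 : i + cnt ≤ chars.length)
    (hrun : ∀ m, i ≤ m → m < i + cnt → chars.getD m "" = chars.getD i "")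
    (hmax : i + cnt = chars.length ∨ chars.getD (i + cnt) "" ≠ chars.getD i "") :
    altGo chars i [] =
      [chars.getD i ""] ++
        (if 1 < cnt then (PySem.Int.toStr (cnt : Int)).toList.map (fun ch => String.ofList [ch]) else []) ++
        altGo chars (i + cnt) [] := by
  have hi : i < chars.length := by omega
  have hgi : chars.getD i "" = chars[i] := List.getD_eq_getElem _ _ hi
  have hre : runEnd chars chars[i] (i + 1) = i + cnt := by
    apply runEnd_eq chars chars[i] (i+1) (i+cnt) (by omega) h2
    · intro p hp1 hp2
      rw [hrun p (by omega) hp2, hgi]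
    · rcases hmax with h | h
      · exact Or.inl h
      · exact Or.inr (by rw [← hgi]; exact h)
  rw [altGo, dif_pos hi]
  simp only [hre]
  rw [altGo_out]
  have hsub : i + cnt - i = cnt := by omega
  have hcast : ((i + cnt : Nat) : Int) - (i : Int) = (cnt : Int) := by push_cast; ring
  simp only [hsub, hcast, hgi]
  simp

-- the loop invariant of A: about to process index i with state (cs, count),
-- cs = untouched prefix ++ already-compressed suffix, count = seen length of the run at i
theorem loopA_inv (chars : List String) : ∀ (i : Nat) (cs : List String) (count : Int),
    1 ≤ count →
    i + count.toNat ≤ chars.length →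
    cs = List.take (i + count.toNat) chars ++ altGo chars (i + count.toNat) [] →
    (∀ m, i ≤ m → m < i + count.toNat → chars.getD m "" = chars.getD i "") →
    (i + count.toNat = chars.length ∨ chars.getD (i + count.toNat) "" ≠ chars.getD i "") →
    ((PySem.List.pyRange ((i : Nat) : Int) (-1) (-1)).foldl stepA (cs, count)).1 = altGo chars 0 [] := by
  intro i
  induction i with
  | zero =>
    intro cs count hc hlen hcs hrun hmax
    have hcnt : count = ((count.toNat : Nat) : Int) := by omega
    rw [Nat.cast_zero, pyRange_down_zero]
    simp only [List.foldl_cons, List.foldl_nil]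
    have hg : PySem.List.pyGetD cs 0 "" = chars.getD 0 "" := by
      rw [PySem.List.pyGetD_zero, hcs, getD_prefix chars _ _ 0 (by omega) (by omega)]
    have hdrop : cs.drop (0 + count).toNat = altGo chars (0 + count.toNat) [] := by
      rw [hcs]
      apply List.drop_left'
      rw [List.length_take]
      omega
    have hflush := altGo_run chars 0 count.toNat (by omega) (by omega) hrun hmax
    rw [stepA]
    simp only []
    rw [if_neg (by simp)]
    by_cases h1 : count = 1
    · rw [if_pos h1]
      simp only [Int.toNat_zero, List.take_zero, hdrop, hg]
      rw [hflush]
      simp [h1]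
    · rw [if_neg h1]
      simp only [Int.toNat_zero, List.take_zero, hdrop, hg]
      rw [hflush]
      rw [if_pos (by omega)]
      rw [hcnt]
      simp
  | succ i ih =>
    intro cs count hc hlen hcs hrun hmax
    have hcnt : count = ((count.toNat : Nat) : Int) := by omega
    rw [pyRange_down_succ, List.foldl_cons]
    have hgi1 : PySem.List.pyGetD cs ((i + 1 : Nat) : Int) "" = chars.getD (i + 1) "" := by
      rw [PySem.List.pyGetD_natCast, hcs, getD_prefix chars _ _ (i + 1) (by omega) (by omega)]
    have hgi : PySem.List.pyGetD cs (((i + 1 : Nat) : Int) - 1) "" = chars.getD i "" := by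
      rw [show ((i + 1 : Nat) : Int) - 1 = ((i : Nat) : Int) by push_cast; ring,
          PySem.List.pyGetD_natCast, hcs, getD_prefix chars _ _ i (by omega) (by omega)]
    by_cases heq : chars.getD (i + 1) "" = chars.getD i ""
    · have hstep : stepA (cs, count) ((i + 1 : Nat) : Int) = (cs, count + 1) := by
        rw [stepA]
        simp only []
        rw [if_pos ⟨by omega, by rw [hgi1, hgi]; exact heq⟩]
      rw [hstep]
      apply ih cs (count + 1) (by omega) (by omega)
      · rw [hcs]
        congr 1 <;> · congr 1; omega
      · intro m hm1 hm2
        by_cases hmi : m = i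
        · rw [hmi]
        · rw [← heq]
          exact hrun m (by omega) (by omega)
      · rw [show i + (count + 1).toNat = i + 1 + count.toNat by omega, ← heq]
        exact hmax
    · have htoN : (((i + 1 : Nat) : Int) + count).toNat = (i + 1) + count.toNat := by omega
      have htake : cs.take ((i + 1 : Nat) : Int).toNat = List.take (i + 1) chars := by
        rw [Int.toNat_natCast, hcs, List.take_append_of_le_length (by rw [List.length_take]; omega),
            List.take_take]
        congr 1
        omega
      have hdrop : cs.drop (((i + 1 : Nat) : Int) + count).toNat = altGo chars ((i + 1) + count.toNat) [] := by
        rw [htoN, hcs]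
        apply List.drop_left'
        rw [List.length_take]
        omega
      have hflush := altGo_run chars (i + 1) count.toNat (by omega) (by omega) hrun hmax
      have hrest : ∀ cs', cs' = List.take (i + 1) chars ++ altGo chars (i + 1) [] →
          ((PySem.List.pyRange ((i : Nat) : Int) (-1) (-1)).foldl stepA (cs', 1)).1 = altGo chars 0 [] := by
        intro cs' hcs'
        apply ih cs' 1 (by omega) (by simpa using (by omega : i + 1 ≤ chars.length)) (by simpa using hcs')
        · intro m hm1 hm2
          have : m = i := by omega
          rw [this]
        · exact Or.inr (fun h => heq (by simpa using h))
      have hstep : stepA (cs, count) ((i + 1 : Nat) : Int) =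
          (List.take (i + 1) chars ++ altGo chars (i + 1) [], 1) := by
        rw [stepA]
        simp only []
        rw [if_neg (by rw [hgi1, hgi]; exact fun h => heq h.2)]
        by_cases h1 : count = 1
        · rw [if_pos h1]
          rw [htake, hdrop, hgi1, hflush]
          rw [if_neg (by omega)]
          simp [h1]
        · rw [if_neg h1]
          rw [htake, hdrop, hgi1, hflush]
          rw [if_pos (by omega)]
          rw [hcnt]
          simp
      rw [hstep]
      exact hrest _ rfl

-- ===== VERDICT (by name: the statement is the Claim_ definition above) =====
theorem compress_spec : Claim_equal_compress := by
  unfold Claim_equal_compress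
  intro chars _
  unfold Spec_compress compress compress_alt
  by_cases h0 : chars.length = 0
  · have h1 : chars = [] := List.length_eq_zero_iff.mp h0
    subst h1
    rw [show ((List.length ([] : List String) : Int) - 1) = (-1 : Int) by simp, pyRange_down_nil]
    rw [altGo]
    simp
  · have hlen : 1 ≤ chars.length := by omega
    have hE : altGo chars ((chars.length - 1) + (1:Int).toNat) [] = [] := by
      rw [show (chars.length - 1) + (1:Int).toNat = chars.length by omega, altGo]
      simp
    have hinv := loopA_inv chars (chars.length - 1) chars 1 (by norm_num) (by omega)
      (by rw [hE, show (chars.length - 1) + (1:Int).toNat = chars.length by omega]; simp)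
      (fun m hm1 hm2 => by rw [show m = chars.length - 1 by omega])
      (Or.inl (by omega))
    rw [show ((chars.length : Int) - 1) = (((chars.length - 1 : Nat)) : Int) by omega]
    exact hinv
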